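-- pv_equiv track=rewrite | github.com/Rome-Tx/totalrecall | scripts/compute_lc_filter.py | lc_max_score
-- ===== SOURCE A (Python) =====
-- def lc_max_score(seq):
--     S = 0
--     MS = 0  # maximal score
--     for ch in seq:
--         if ch in "ACGT":
--             S -= 1
--         else:
--             S += 1
--             MS = max(S, MS)
--     return MS
-- ===== SOURCE B (Python) =====
-- def lc_max_score(seq):
--     # Divide and conquer: for a segment return (total, best) where total is the
--     # sum of +/-1 deltas and best is the max prefix score (empty prefix = 0).
--     # Combine: best(L+R) = max(best(L), total(L) + best(R)).
--     def solve(lo, hi):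
--         if hi - lo == 0:
--             return (0, 0)
--         if hi - lo == 1:
--             d = -1 if seq[lo] in "ACGT" else 1
--             return (d, max(0, d))
--         mid = (lo + hi) // 2
--         tl, bl = solve(lo, mid)
--         tr, br = solve(mid, hi)
--         return (tl + tr, max(bl, tl + br))
--     return solve(0, len(seq))[1]
-- ===== Notes on version B (the rewrite author's own statement) =====
-- stated objective: alternative
-- what changed: B computes the answer by divide and conquer on the string, returning per segment the pair (total delta, max prefix score) and merging halves with best(L+R)=max(best L, total L + best R), instead of A's single left-to-right pass with a running max.
import Mathlib
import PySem

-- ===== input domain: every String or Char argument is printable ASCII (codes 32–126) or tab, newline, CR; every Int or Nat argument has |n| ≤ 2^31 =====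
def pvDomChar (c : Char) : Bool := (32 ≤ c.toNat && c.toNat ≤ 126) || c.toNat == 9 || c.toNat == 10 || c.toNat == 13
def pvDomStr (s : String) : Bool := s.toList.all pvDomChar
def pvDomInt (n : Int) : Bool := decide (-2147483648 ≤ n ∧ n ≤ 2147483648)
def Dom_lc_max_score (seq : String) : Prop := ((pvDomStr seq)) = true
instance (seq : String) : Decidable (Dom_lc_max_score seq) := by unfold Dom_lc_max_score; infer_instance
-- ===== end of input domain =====

-- B replaces A's single left-to-right running-max pass by a divide-and-conquer on the
-- string merging (total delta, max prefix score) pairs; alternative decomposition, same cost.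


-- ===== PORT A =====
-- loop over seq with state (S, MS); MS updated only on the non-ACGT branch
def lc_max_score (seq : String) : Int :=
  (seq.toList.foldl
    (fun (p : Int × Int) ch =>
      if ch ∈ "ACGT".toList then (p.1 - 1, p.2)
      else (p.1 + 1, max (p.1 + 1) p.2))
    (0, 0)).2

-- ===== PORT B =====
-- solve(lo,hi) on a segment, here carried as the segment's character list:
-- returns (total delta, max prefix score); halves split at the midpoint.
def lcSolve : List Char → Int × Int
  | [] => (0, 0)
  | [c] => let d : Int := if c ∈ "ACGT".toList then -1 else 1; (d, max 0 d)
  | c1 :: c2 :: rest =>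
      let l := c1 :: c2 :: rest
      let m := l.length / 2
      let pL := lcSolve (l.take m)
      let pR := lcSolve (l.drop m)
      (pL.1 + pR.1, max pL.2 (pL.1 + pR.2))
termination_by l => l.length
decreasing_by
  · simp [List.length_take]; omega
  · simp [List.length_drop]; omega

def lc_max_score_alt (seq : String) : Int :=
  (lcSolve seq.toList).2

-- ===== PRECONDITION & SPEC =====
def Spec_lc_max_score (seq : String) (out : Int) : Prop := out = lc_max_score_alt seq
instance (seq : String) (out : Int) : Decidable (Spec_lc_max_score seq out) := by unfold Spec_lc_max_score; infer_instance

-- ===== CLAIM (what is proved, stated in full; the proofs are below) =====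
def Claim_equal_lc_max_score : Prop := ∀ (seq : String), Dom_lc_max_score seq → Spec_lc_max_score seq (lc_max_score seq)

-- ===== LEMMAS AND PROOFS =====

-- reference semantics: per-character delta, total, and max prefix score (empty prefix = 0)
def lcDelta (c : Char) : Int := if c ∈ "ACGT".toList then -1 else 1

def lcTot (l : List Char) : Int := (l.map lcDelta).sum

def lcBest : List Char → Int
  | [] => 0
  | c :: t => max 0 (lcDelta c + lcBest t)

theorem lcBest_nonneg (l : List Char) : 0 ≤ lcBest l := by
  cases l <;> simp [lcBest]

theorem lcBest_append (L R : List Char) :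
    lcBest (L ++ R) = max (lcBest L) (lcTot L + lcBest R) := by
  induction L with
  | nil =>
    simp [lcBest, lcTot]
    exact lcBest_nonneg R
  | cons c t ih =>
    simp only [List.cons_append, lcBest, ih, lcTot, List.map_cons, List.sum_cons]
    omega

theorem lcTot_append (L R : List Char) : lcTot (L ++ R) = lcTot L + lcTot R := by
  simp [lcTot]

-- B's divide and conquer computes exactly (lcTot, lcBest)
theorem lcSolve_eq (l : List Char) : lcSolve l = (lcTot l, lcBest l) := by
  induction l using lcSolve.induct with
  | case1 => simp [lcSolve, lcTot, lcBest]
  | case2 c =>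
    rw [lcSolve]
    show _ = (lcTot [c], lcBest [c])
    simp only [lcTot, lcBest, lcDelta, List.map_cons, List.map_nil, List.sum_cons,
      List.sum_nil, add_zero]
  | case3 c1 c2 rest l m ihL ihR =>
    rw [lcSolve]
    rw [ihL, ihR]
    have h := List.take_append_drop ((c1 :: c2 :: rest).length / 2) (c1 :: c2 :: rest)
    conv_rhs => rw [← h]
    rw [lcTot_append, lcBest_append]

-- loop invariant for A: with S ≤ MS, the fold returns max MS (S + lcBest l)
theorem lc_fold_eq (l : List Char) :
    ∀ (S MS : Int), S ≤ MS →
      (l.foldl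
        (fun (p : Int × Int) ch =>
          if ch ∈ "ACGT".toList then (p.1 - 1, p.2)
          else (p.1 + 1, max (p.1 + 1) p.2))
        (S, MS)).2 = max MS (S + lcBest l) := by
  induction l with
  | nil => intro S MS h; simp [lcBest]; omega
  | cons c t ih =>
    intro S MS h
    by_cases hc : c ∈ "ACGT".toList
    · simp only [List.foldl_cons, if_pos hc]
      rw [ih (S - 1) MS (by omega)]
      simp only [lcBest, lcDelta, if_pos hc]
      have := lcBest_nonneg t
      omega
    · simp only [List.foldl_cons, if_neg hc]
      rw [ih (S + 1) (max (S + 1) MS) (le_max_left _ _)]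
      simp only [lcBest, lcDelta, if_neg hc]
      have := lcBest_nonneg t
      omega

-- ===== VERDICT (by name: the statement is the Claim_ definition above) =====
theorem lc_max_score_spec : Claim_equal_lc_max_score := by
  intro seq _
  unfold Spec_lc_max_score lc_max_score lc_max_score_alt
  rw [lc_fold_eq seq.toList 0 0 le_rfl, lcSolve_eq]
  have := lcBest_nonneg seq.toList
  simp; omega
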